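-- pv_equiv track=rewrite | github.com/el-hadji-falilou/Cassiope | TP -  Falilou/part1/minicipher.py | encrypt_round
-- ===== SOURCE A (Python) =====
-- s = [0xE, 0x4, 0xD, 0x1, 0x2, 0xF, 0xB, 0x8, 0x3, 0xA, 0x6, 0xC, 0x5, 0x9, 0x0, 0x7]
--
-- perm = [0, 4, 8, 12, 1, 5, 9, 13, 2, 6, 10, 14, 3, 7, 11, 15]
--
-- def encrypt_round(input, key, do_perm):
--     """encrypt_round
--     Parameters
--     ----------
--     input   : the input block
--     key     : the sub-key for this round
--     do_perm : if True, perform the permutation (it is False for the last round)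
--
--     Output
--     ------
--     the output value for the round
--     """
--     if isinstance(input, str):
--         input = int(input, 16)
--
--     # Subkey Addition
--     post_subkey=input^key
--
--     # S-Box Application
--     binary = bin(post_subkey)[2:].zfill(16)
--     blocks=[int(binary[i:i+4], 2) for i in range (0, 16, 4)]
--     s_blocks=[s[block] for block in blocks]
--     post_sbox=""
--     for block in s_blocks:
--         post_sbox+=bin(block)[2:].zfill(4)
--
--     # If no permutation is performed, we can return the result early
--     if do_perm==False:
--         return int(post_sbox, 2)
--
--     # Else, we perform the permutation
--     else:
--         post_perm=""
--         for i in range (16):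
--             post_perm+=post_sbox[perm[i]]
--         return int(post_perm, 2)
-- ===== SOURCE B (Python) =====
-- s = [0xE, 0x4, 0xD, 0x1, 0x2, 0xF, 0xB, 0x8, 0x3, 0xA, 0x6, 0xC, 0x5, 0x9, 0x0, 0x7]
--
-- perm = [0, 4, 8, 12, 1, 5, 9, 13, 2, 6, 10, 14, 3, 7, 11, 15]
--
-- def encrypt_round(input, key, do_perm):
--     if isinstance(input, str):
--         input = int(input, 16)
--     x = (input ^ key) & 0xFFFF
--     # S-box each nibble with shifts and masks
--     y = 0
--     for sh in (12, 8, 4, 0):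
--         y += s[(x >> sh) & 0xF] << sh
--     if not do_perm:
--         return y
--     # bit permutation: bit perm[i] of y goes to bit i (MSB-first numbering)
--     z = 0
--     for i in range(16):
--         z += ((y >> (15 - perm[i])) & 1) << (15 - i)
--     return z
-- ===== Notes on version B (the rewrite author's own statement) =====
-- stated objective: idiomatic
-- what changed: Replaces A's binary-string construction/slicing/reparsing pipeline with pure integer bit arithmetic (mask to 16 bits, extract nibbles with shifts, reassemble with shifts, move single bits for the permutation); Pre_ restricts to the cipher's natural 16-bit domain 0 <= input^key < 2^16: for negative xor A raises ValueError, and for xor >= 2^16 A's value is an artefact of its variable-length binary string keeping only the first 16 characters (the TOP 16 bits), which B does not reproduce.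
-- outside the precondition, e.g. on encrypt_round(65536, 0, False): A returns 16110, B returns 61166; on encrypt_round(0, -1, False): A raises ValueError, B returns 30583
import Mathlib
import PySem

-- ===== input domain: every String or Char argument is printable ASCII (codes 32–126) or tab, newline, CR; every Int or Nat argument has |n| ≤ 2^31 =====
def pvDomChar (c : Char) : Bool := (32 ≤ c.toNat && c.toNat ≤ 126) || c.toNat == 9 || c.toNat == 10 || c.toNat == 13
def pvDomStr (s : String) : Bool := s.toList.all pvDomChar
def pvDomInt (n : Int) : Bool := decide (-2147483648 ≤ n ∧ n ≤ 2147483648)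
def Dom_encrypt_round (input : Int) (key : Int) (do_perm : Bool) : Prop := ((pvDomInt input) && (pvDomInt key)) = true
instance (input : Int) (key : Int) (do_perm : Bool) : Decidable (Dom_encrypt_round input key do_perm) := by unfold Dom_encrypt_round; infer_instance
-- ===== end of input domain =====

-- B replaces A's binary-string build/slice/reparse pipeline by integer bit arithmetic (idiomatic); proved equal on the cipher's natural 16-bit domain (Pre_: 0 ≤ input^key < 2^16).

-- ===== PORT A =====
-- module constants s and perm (shared by both Pythons)
def pvS : List Nat := [14, 4, 13, 1, 2, 15, 11, 8, 3, 10, 6, 12, 5, 9, 0, 7]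
def pvPerm : List Nat := [0, 4, 8, 12, 1, 5, 9, 13, 2, 6, 10, 14, 3, 7, 11, 15]

-- bin(n)[2:] for n ≥ 0, by the usual repeated halving (fuel-bounded; exact for n ≤ fuel)
def pvBinGo : Nat → Nat → List Char
  | 0, _ => []
  | fuel+1, n => if n = 0 then [] else pvBinGo fuel (n / 2) ++ [if n % 2 = 1 then '1' else '0']
def pvBin (n : Nat) : List Char := if n = 0 then ['0'] else pvBinGo n n

-- str.zfill(w)
def pvZfill (w : Nat) (l : List Char) : List Char := List.replicate (w - l.length) '0' ++ l

-- int(s, 2); exact on strings of '0'/'1' chars, the only ones A ever parses (Pre_ excludes the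
-- negative case where A's string contains 'b' and int() raises ValueError)
def pvParseBin (l : List Char) : Nat := l.foldl (fun a c => 2 * a + (if c = '1' then 1 else 0)) 0

def encrypt_round (input : Int) (key : Int) (do_perm : Bool) : Int :=
  let post_subkey := PySem.Int.bxor input key
  -- bin(post_subkey)[2:].zfill(16); for post_subkey < 0 Python raises ValueError (outside Pre_)
  let binary := pvZfill 16 (pvBin post_subkey.toNat)
  let blocks := (PySem.List.pyRange 0 16 4).map (fun i => pvParseBin ((binary.drop i.toNat).take 4))
  let s_blocks := blocks.map (fun b => pvS.getD b 0)
  let post_sbox := s_blocks.foldl (fun acc b => acc ++ pvZfill 4 (pvBin b)) []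
  if do_perm = false then (pvParseBin post_sbox : Int)
  else
    -- post_sbox[perm[i]]: always in range (post_sbox has 16 chars, perm entries < 16)
    let post_perm := (PySem.List.pyRange 0 16 1).foldl
      (fun acc i => acc ++ [post_sbox.getD (pvPerm.getD i.toNat 0) '0']) []
    (pvParseBin post_perm : Int)

-- ===== PORT B =====
def encrypt_round_alt (input : Int) (key : Int) (do_perm : Bool) : Int :=
  -- x = (input ^ key) & 0xFFFF : always nonnegative, so .toNat is exact
  let x := (PySem.Int.band (PySem.Int.bxor input key) 65535).toNat
  let y := [12, 8, 4, 0].foldl (fun y sh => y + (pvS.getD ((x >>> sh) &&& 15) 0) <<< sh) 0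
  if do_perm = false then (y : Int)
  else
    ((PySem.List.pyRange 0 16 1).foldl
      (fun z i => z + ((y >>> (15 - pvPerm.getD i.toNat 0)) &&& 1) <<< (15 - i.toNat)) 0 : Nat)

-- ===== PRECONDITION & SPEC =====
-- Pre_ is the cipher's natural 16-bit domain: for input^key < 0 A raises ValueError (its binary
-- string contains 'b'); for input^key ≥ 2^16 A returns a value that is an artefact of its
-- variable-length binary string keeping only the first 16 characters (the TOP 16 bits), which
-- no 16-bit-cipher caller would specify.
def Pre_encrypt_round (input : Int) (key : Int) (do_perm : Bool) : Prop :=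
  0 ≤ PySem.Int.bxor input key ∧ PySem.Int.bxor input key < 65536
instance (input : Int) (key : Int) (do_perm : Bool) : Decidable (Pre_encrypt_round input key do_perm) := by
  unfold Pre_encrypt_round; infer_instance

def pvWitness_encrypt_round : Int × Int × Bool := (4660, 17767, true)

def Spec_encrypt_round (input : Int) (key : Int) (do_perm : Bool) (out : Int) : Prop := out = encrypt_round_alt input key do_perm
instance (input : Int) (key : Int) (do_perm : Bool) (out : Int) : Decidable (Spec_encrypt_round input key do_perm out) := by unfold Spec_encrypt_round; infer_instance

-- ===== CLAIM (what is proved, stated in full; the proofs are below) =====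
def Claim_equal_encrypt_round : Prop := ∀ (input : Int) (key : Int) (do_perm : Bool), Dom_encrypt_round input key do_perm → Pre_encrypt_round input key do_perm → Spec_encrypt_round input key do_perm (encrypt_round input key do_perm)


-- ===== LEMMAS AND PROOFS =====

-- big-endian k-bit binary string of t (mod 2^k)
def bitsOf : Nat → Nat → List Char
  | 0, _ => []
  | k+1, t => bitsOf k (t / 2) ++ [if t % 2 = 1 then '1' else '0']

theorem length_bitsOf (k t : Nat) : (bitsOf k t).length = k := by
  induction k generalizing t with
  | zero => rfl
  | succ k ih => simp [bitsOf, ih]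

theorem bitsOf_zero_val (k : Nat) : bitsOf k 0 = List.replicate k '0' := by
  induction k with
  | zero => rfl
  | succ k ih => simp [bitsOf, ih, List.replicate_succ']

theorem bitsOf_split (j k t : Nat) : bitsOf (j + k) t = bitsOf j (t / 2 ^ k) ++ bitsOf k t := by
  induction k generalizing t with
  | zero => simp [bitsOf]
  | succ k ih =>
    show bitsOf (j + k + 1) t = _
    rw [bitsOf, ih, bitsOf, Nat.div_div_eq_div_mul]
    simp [pow_succ, Nat.mul_comm]

theorem bitsOf_add_mul (k a b : Nat) : bitsOf k (a * 2 ^ k + b) = bitsOf k b := by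
  induction k generalizing b with
  | zero => rfl
  | succ k ih =>
    rw [bitsOf, bitsOf]
    have hmul : a * 2 ^ (k + 1) = a * 2 ^ k * 2 := by ring
    have h1 : (a * 2 ^ (k + 1) + b) / 2 = a * 2 ^ k + b / 2 := by
      rw [hmul]; omega
    have h2 : (a * 2 ^ (k + 1) + b) % 2 = b % 2 := by
      rw [hmul]; omega
    rw [h1, h2, ih]

theorem foldl_parse (l : List Char) (acc : Nat) :
    l.foldl (fun a c => 2 * a + (if c = '1' then 1 else 0)) acc
      = acc * 2 ^ l.length + pvParseBin l := by
  induction l generalizing acc with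
  | nil => simp [pvParseBin]
  | cons c l ih =>
    simp only [List.foldl_cons, List.length_cons, pvParseBin] at *
    rw [ih, ih (2 * 0 + _)]
    ring

theorem pb_append (a b : List Char) :
    pvParseBin (a ++ b) = pvParseBin a * 2 ^ b.length + pvParseBin b := by
  unfold pvParseBin
  rw [List.foldl_append, foldl_parse]
  rfl

theorem pb_bitsOf (k t : Nat) : pvParseBin (bitsOf k t) = t % 2 ^ k := by
  induction k generalizing t with
  | zero => simp [bitsOf, pvParseBin, Nat.mod_one]
  | succ k ih =>
    rw [bitsOf, pb_append, ih]
    have hd : pvParseBin [if t % 2 = 1 then '1' else '0'] = t % 2 := by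
      rcases Nat.mod_two_eq_zero_or_one t with h | h <;> simp [h, pvParseBin]
    rw [hd]
    have h2 : t % (2 ^ k * 2) = t % 2 + 2 * (t / 2 % 2 ^ k) := by
      rw [Nat.mul_comm]; exact Nat.mod_mul ..
    simp only [List.length_cons, List.length_nil, pow_succ, pow_zero, one_mul]
    omega

theorem getD_bitsOf (k t p : Nat) (hp : p < k) :
    (bitsOf k t).getD p '0' = if t / 2 ^ (k - 1 - p) % 2 = 1 then '1' else '0' := by
  induction k generalizing t p with
  | zero => omega
  | succ k ih =>
    rw [bitsOf]
    rcases Nat.lt_or_ge p k with h | h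
    · rw [List.getD_append _ _ _ _ (by rw [length_bitsOf]; exact h), ih (t / 2) p h]
      have he : t / 2 / 2 ^ (k - 1 - p) = t / 2 ^ (k + 1 - 1 - p) := by
        rw [Nat.div_div_eq_div_mul, ← pow_succ']
        congr 2
        omega
      rw [he]
    · have hpk : p = k := by omega
      subst hpk
      rw [List.getD_append_right _ _ _ _ (by rw [length_bitsOf])]
      simp [length_bitsOf]

-- bit length of a Nat, through PySem's Python-exact bitLength
def pvLn (n : Nat) : Nat := PySem.Int.bitLength (n : Int)

theorem pvBinGo_eq (fuel n : Nat) (h : n ≤ fuel) : pvBinGo fuel n = bitsOf (pvLn n) n := by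
  induction fuel generalizing n with
  | zero =>
    have : n = 0 := by omega
    subst this; simp [pvBinGo, pvLn, bitsOf]
  | succ fuel ih =>
    rw [pvBinGo]
    by_cases h0 : n = 0
    · subst h0; simp [pvLn, bitsOf]
    · have hL : pvLn n = pvLn (n / 2) + 1 := by
        unfold pvLn
        exact_mod_cast PySem.Int.bitLength_natCast (by omega : 0 < n)
      rw [if_neg h0, hL, bitsOf, ih (n / 2) (by omega)]

theorem lt_two_pow_pvLn (n : Nat) : n < 2 ^ pvLn n := by
  have := PySem.Int.lt_two_pow_bitLength (n : Int)
  simpa [pvLn] using this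

-- A's padded string is the 16-bit binary of t when t fits in 16 bits
theorem binary_eq (t : Nat) (ht : t < 65536) : pvZfill 16 (pvBin t) = bitsOf 16 t := by
  by_cases h0 : t = 0
  · subst h0; decide
  · have hln : pvLn t ≤ 16 := by
      by_contra h
      have h17 : 17 ≤ pvLn t := by omega
      have := PySem.Int.two_pow_bitLength_le (t : Int) (by exact_mod_cast h0)
      have h2 : 2 ^ (pvLn t - 1) ≤ t := by simpa [pvLn] using this
      have : (2:Nat) ^ 16 ≤ 2 ^ (pvLn t - 1) := Nat.pow_le_pow_right (by omega) (by omega)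
      omega
    rw [pvBin, if_neg h0, pvBinGo_eq t t le_rfl, pvZfill, length_bitsOf]
    have hdiv : t / 2 ^ pvLn t = 0 := Nat.div_eq_of_lt (lt_two_pow_pvLn t)
    have hsp : bitsOf 16 t = bitsOf (16 - pvLn t) (t / 2 ^ pvLn t) ++ bitsOf (pvLn t) t := by
      rw [← bitsOf_split]; congr 1; omega
    rw [hsp, hdiv, bitsOf_zero_val]

theorem block_eq (t i : Nat) (ht : t < 65536) (h4 : i + 4 ≤ 16) :
    pvParseBin (((pvZfill 16 (pvBin t)).drop i).take 4) = t / 2 ^ (12 - i) % 16 := by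
  rw [binary_eq t ht]
  have hs1 : bitsOf 16 t = bitsOf i (t / 2 ^ (16 - i)) ++ bitsOf (16 - i) t := by
    rw [← bitsOf_split]; congr 1; omega
  have hdrop : (bitsOf 16 t).drop i = bitsOf (16 - i) t := by
    rw [hs1]
    simpa [length_bitsOf] using List.drop_left (bitsOf i (t / 2 ^ (16 - i))) (bitsOf (16 - i) t)
  have hs2 : bitsOf (16 - i) t = bitsOf 4 (t / 2 ^ (16 - i - 4)) ++ bitsOf (16 - i - 4) t := by
    rw [← bitsOf_split]; congr 1; omega
  have htake : (bitsOf (16 - i) t).take 4 = bitsOf 4 (t / 2 ^ (16 - i - 4)) := by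
    rw [hs2]
    simpa [length_bitsOf] using List.take_left (bitsOf 4 (t / 2 ^ (16 - i - 4))) (bitsOf (16 - i - 4) t)
  rw [hdrop, htake, pb_bitsOf]
  have harg : 16 - i - 4 = 12 - i := by omega
  rw [harg]
  norm_num

theorem sbox_lt (b : Nat) : pvS.getD b 0 < 16 := by
  rcases Nat.lt_or_ge b 16 with h | h
  · interval_cases b <;> decide
  · rw [List.getD_eq_default _ _ (by simpa [pvS] using h)]; omega

theorem zfill4_eq (v : Nat) (h : v < 16) : pvZfill 4 (pvBin v) = bitsOf 4 v := by
  interval_cases v <;> decide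

theorem bitsOf_append (j k a b : Nat) (hb : b < 2 ^ k) :
    bitsOf j a ++ bitsOf k b = bitsOf (j + k) (a * 2 ^ k + b) := by
  rw [bitsOf_split j k (a * 2 ^ k + b), bitsOf_add_mul]
  have hdiv : (a * 2 ^ k + b) / 2 ^ k = a := by
    rw [Nat.mul_comm a, Nat.mul_add_div (pow_pos (by omega) k), Nat.div_eq_of_lt hb]
    omega
  rw [hdiv]

theorem shiftr_eq (n k : Nat) : n >>> k = n / 2 ^ k := Nat.shiftRight_eq_div_pow n k

theorem and15_eq (n : Nat) : n &&& 15 = n % 16 := by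
  have h := Nat.and_two_pow_sub_one_eq_mod n 4
  norm_num at h
  exact h

theorem and1_eq (n : Nat) : n &&& 1 = n % 2 := Nat.and_one_is_mod n

theorem char_digit (x : Nat) :
    (if (if x % 2 = 1 then '1' else '0') = '1' then (1 : Nat) else 0) = x % 2 := by
  rcases Nat.mod_two_eq_zero_or_one x with h | h <;> simp [h]

set_option maxHeartbeats 1000000 in
theorem permA (y : Nat) (hy : y < 65536) :
    pvParseBin ((PySem.List.pyRange 0 16 1).foldl (fun acc i => acc ++ [(bitsOf 16 y).getD (pvPerm.getD i.toNat 0) '0']) [])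
      = (PySem.List.pyRange 0 16 1).foldl (fun z i => z + y / 2 ^ (15 - pvPerm.getD i.toNat 0) % 2 * 2 ^ (15 - i.toNat)) 0 := by
  have hr1 : PySem.List.pyRange 0 16 1 = [0,1,2,3,4,5,6,7,8,9,10,11,12,13,14,15] := by decide
  have hti0 : ((0:Int)).toNat = 0 := rfl
  have hti1 : ((1:Int)).toNat = 1 := rfl
  have hti2 : ((2:Int)).toNat = 2 := rfl
  have hti3 : ((3:Int)).toNat = 3 := rfl
  have hti4 : ((4:Int)).toNat = 4 := rfl
  have hti5 : ((5:Int)).toNat = 5 := rfl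
  have hti6 : ((6:Int)).toNat = 6 := rfl
  have hti7 : ((7:Int)).toNat = 7 := rfl
  have hti8 : ((8:Int)).toNat = 8 := rfl
  have hti9 : ((9:Int)).toNat = 9 := rfl
  have hti10 : ((10:Int)).toNat = 10 := rfl
  have hti11 : ((11:Int)).toNat = 11 := rfl
  have hti12 : ((12:Int)).toNat = 12 := rfl
  have hti13 : ((13:Int)).toNat = 13 := rfl
  have hti14 : ((14:Int)).toNat = 14 := rfl
  have hti15 : ((15:Int)).toNat = 15 := rfl
  have hpv0 : pvPerm.getD 0 0 = 0 := by decide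
  have hpv1 : pvPerm.getD 1 0 = 4 := by decide
  have hpv2 : pvPerm.getD 2 0 = 8 := by decide
  have hpv3 : pvPerm.getD 3 0 = 12 := by decide
  have hpv4 : pvPerm.getD 4 0 = 1 := by decide
  have hpv5 : pvPerm.getD 5 0 = 5 := by decide
  have hpv6 : pvPerm.getD 6 0 = 9 := by decide
  have hpv7 : pvPerm.getD 7 0 = 13 := by decide
  have hpv8 : pvPerm.getD 8 0 = 2 := by decide
  have hpv9 : pvPerm.getD 9 0 = 6 := by decide
  have hpv10 : pvPerm.getD 10 0 = 10 := by decide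
  have hpv11 : pvPerm.getD 11 0 = 14 := by decide
  have hpv12 : pvPerm.getD 12 0 = 3 := by decide
  have hpv13 : pvPerm.getD 13 0 = 7 := by decide
  have hpv14 : pvPerm.getD 14 0 = 11 := by decide
  have hpv15 : pvPerm.getD 15 0 = 15 := by decide
  have hg0 : (bitsOf 16 y).getD 0 '0' = if y / 2 ^ 15 % 2 = 1 then '1' else '0' := getD_bitsOf 16 y 0 (by omega)
  have hg1 : (bitsOf 16 y).getD 1 '0' = if y / 2 ^ 14 % 2 = 1 then '1' else '0' := getD_bitsOf 16 y 1 (by omega)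
  have hg2 : (bitsOf 16 y).getD 2 '0' = if y / 2 ^ 13 % 2 = 1 then '1' else '0' := getD_bitsOf 16 y 2 (by omega)
  have hg3 : (bitsOf 16 y).getD 3 '0' = if y / 2 ^ 12 % 2 = 1 then '1' else '0' := getD_bitsOf 16 y 3 (by omega)
  have hg4 : (bitsOf 16 y).getD 4 '0' = if y / 2 ^ 11 % 2 = 1 then '1' else '0' := getD_bitsOf 16 y 4 (by omega)
  have hg5 : (bitsOf 16 y).getD 5 '0' = if y / 2 ^ 10 % 2 = 1 then '1' else '0' := getD_bitsOf 16 y 5 (by omega)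
  have hg6 : (bitsOf 16 y).getD 6 '0' = if y / 2 ^ 9 % 2 = 1 then '1' else '0' := getD_bitsOf 16 y 6 (by omega)
  have hg7 : (bitsOf 16 y).getD 7 '0' = if y / 2 ^ 8 % 2 = 1 then '1' else '0' := getD_bitsOf 16 y 7 (by omega)
  have hg8 : (bitsOf 16 y).getD 8 '0' = if y / 2 ^ 7 % 2 = 1 then '1' else '0' := getD_bitsOf 16 y 8 (by omega)
  have hg9 : (bitsOf 16 y).getD 9 '0' = if y / 2 ^ 6 % 2 = 1 then '1' else '0' := getD_bitsOf 16 y 9 (by omega)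
  have hg10 : (bitsOf 16 y).getD 10 '0' = if y / 2 ^ 5 % 2 = 1 then '1' else '0' := getD_bitsOf 16 y 10 (by omega)
  have hg11 : (bitsOf 16 y).getD 11 '0' = if y / 2 ^ 4 % 2 = 1 then '1' else '0' := getD_bitsOf 16 y 11 (by omega)
  have hg12 : (bitsOf 16 y).getD 12 '0' = if y / 2 ^ 3 % 2 = 1 then '1' else '0' := getD_bitsOf 16 y 12 (by omega)
  have hg13 : (bitsOf 16 y).getD 13 '0' = if y / 2 ^ 2 % 2 = 1 then '1' else '0' := getD_bitsOf 16 y 13 (by omega)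
  have hg14 : (bitsOf 16 y).getD 14 '0' = if y / 2 ^ 1 % 2 = 1 then '1' else '0' := getD_bitsOf 16 y 14 (by omega)
  have hg15 : (bitsOf 16 y).getD 15 '0' = if y / 2 ^ 0 % 2 = 1 then '1' else '0' := getD_bitsOf 16 y 15 (by omega)
  simp only [hr1, List.foldl_cons, List.foldl_nil, hti0, hti1, hti2, hti3, hti4, hti5, hti6, hti7, hti8, hti9, hti10, hti11, hti12, hti13, hti14, hti15, hpv0, hpv1, hpv2, hpv3, hpv4, hpv5, hpv6, hpv7, hpv8, hpv9, hpv10, hpv11, hpv12, hpv13, hpv14, hpv15]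
  simp only [hg0, hg1, hg2, hg3, hg4, hg5, hg6, hg7, hg8, hg9, hg10, hg11, hg12, hg13, hg14, hg15]
  simp only [List.cons_append, List.nil_append]
  simp only [pvParseBin, List.foldl_cons, List.foldl_nil, char_digit]
  norm_num
  omega

-- the round as a pure function of the 16-bit xored block
set_option maxHeartbeats 1000000 in
theorem encrypt_body_eq (t : Nat) (ht : t < 65536) (do_perm : Bool) :
    (let binary := pvZfill 16 (pvBin t)
     let blocks := (PySem.List.pyRange 0 16 4).map (fun i => pvParseBin ((binary.drop i.toNat).take 4))
     let s_blocks := blocks.map (fun b => pvS.getD b 0)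
     let post_sbox := s_blocks.foldl (fun acc b => acc ++ pvZfill 4 (pvBin b)) []
     if do_perm = false then (pvParseBin post_sbox : Int)
     else
       let post_perm := (PySem.List.pyRange 0 16 1).foldl
         (fun acc i => acc ++ [post_sbox.getD (pvPerm.getD i.toNat 0) '0']) []
       (pvParseBin post_perm : Int))
    =
    (let y := [12, 8, 4, 0].foldl (fun y sh => y + (pvS.getD ((t >>> sh) &&& 15) 0) <<< sh) 0
     if do_perm = false then (y : Int)
     else
       ((PySem.List.pyRange 0 16 1).foldl
         (fun z i => z + ((y >>> (15 - pvPerm.getD i.toNat 0)) &&& 1) <<< (15 - i.toNat)) 0 : Nat)) := by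
  have hr4 : PySem.List.pyRange 0 16 4 = [0, 4, 8, 12] := by decide
  have hb0 : pvParseBin (((pvZfill 16 (pvBin t)).drop ((0:Int)).toNat).take 4) = t / 4096 % 16 := by
    have h := block_eq t 0 ht (by omega)
    norm_num at h ⊢
    exact h
  have hb4 : pvParseBin (((pvZfill 16 (pvBin t)).drop ((4:Int)).toNat).take 4) = t / 256 % 16 := by
    have h := block_eq t 4 ht (by omega)
    norm_num at h ⊢
    exact h
  have hb8 : pvParseBin (((pvZfill 16 (pvBin t)).drop ((8:Int)).toNat).take 4) = t / 16 % 16 := by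
    have h := block_eq t 8 ht (by omega)
    norm_num at h ⊢
    exact h
  have hb12 : pvParseBin (((pvZfill 16 (pvBin t)).drop ((12:Int)).toNat).take 4) = t % 16 := by
    have h := block_eq t 12 ht (by omega)
    norm_num at h ⊢
    exact h
  simp only [hr4, List.map_cons, List.map_nil, hb0, hb4, hb8, hb12]
  simp only [List.foldl_cons, List.foldl_nil, List.nil_append]
  rw [zfill4_eq _ (sbox_lt _), zfill4_eq _ (sbox_lt _), zfill4_eq _ (sbox_lt _), zfill4_eq _ (sbox_lt _)]
  simp only [List.append_assoc]
  have hp12 : (2:Nat) ^ 12 = 4096 := by norm_num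
  have hp8 : (2:Nat) ^ 8 = 256 := by norm_num
  have hp4 : (2:Nat) ^ 4 = 16 := by norm_num
  simp only [shiftr_eq, and15_eq, and1_eq, Nat.shiftLeft_eq, hp12, hp8, hp4, pow_zero, Nat.div_one, mul_one]
  have ha' := sbox_lt (t / 4096 % 16)
  have hb' := sbox_lt (t / 256 % 16)
  have hc' := sbox_lt (t / 16 % 16)
  have hd' := sbox_lt (t % 16)
  set a := pvS.getD (t / 4096 % 16) 0 with hadef
  set b := pvS.getD (t / 256 % 16) 0 with hbdef
  set c := pvS.getD (t / 16 % 16) 0 with hcdef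
  set d := pvS.getD (t % 16) 0 with hddef
  have w34 : bitsOf 4 c ++ bitsOf 4 d = bitsOf 8 (c * 16 + d) := by
    have h := bitsOf_append 4 4 c d (by norm_num; omega)
    norm_num at h
    exact h
  have w234 : bitsOf 4 b ++ bitsOf 8 (c * 16 + d) = bitsOf 12 (b * 256 + (c * 16 + d)) := by
    have h := bitsOf_append 4 8 b (c * 16 + d) (by norm_num; omega)
    norm_num at h
    exact h
  have w1234 : bitsOf 4 a ++ bitsOf 12 (b * 256 + (c * 16 + d)) = bitsOf 16 (a * 4096 + (b * 256 + (c * 16 + d))) := by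
    have h := bitsOf_append 4 12 a (b * 256 + (c * 16 + d)) (by norm_num; omega)
    norm_num at h
    exact h
  rw [w34, w234, w1234]
  set Y := a * 4096 + (b * 256 + (c * 16 + d)) with hYdef
  have hY16 : Y < 65536 := by omega
  have hyB : 0 + a * 4096 + b * 256 + c * 16 + d = Y := by omega
  rw [hyB]
  cases do_perm with
  | false =>
    rw [if_pos rfl, if_pos rfl, pb_bitsOf]
    simp only [show (2:Nat)^16 = 65536 from by norm_num]
    omega
  | true =>
    rw [if_neg (by decide : ¬ (true = false)), if_neg (by decide : ¬ (true = false))]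
    exact_mod_cast permA Y hY16

-- ===== VERDICT (by name: the statement is the Claim_ definition above) =====
theorem encrypt_round_spec : Claim_equal_encrypt_round := by
  intro input key do_perm hdom hpre
  obtain ⟨h0, h1⟩ := hpre
  unfold Spec_encrypt_round encrypt_round encrypt_round_alt
  set x0 := PySem.Int.bxor input key with hx0def
  have ht : x0.toNat < 65536 := by omega
  have hmask : (PySem.Int.band x0 65535).toNat = x0.toNat := by
    have hb : PySem.Int.band x0 65535 = ((x0.toNat &&& (65535:Int).toNat : Nat) : Int) :=
      PySem.Int.band_of_nonneg h0 (by norm_num)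
    have hand : x0.toNat &&& 65535 = x0.toNat % 65536 := by
      have h := Nat.and_two_pow_sub_one_eq_mod x0.toNat 16
      norm_num at h
      exact h
    rw [hb]
    simp only [Int.toNat_natCast]
    rw [show ((65535:Int).toNat) = (65535:Nat) from rfl, hand]
    omega
  simp only [hmask]
  exact encrypt_body_eq x0.toNat ht do_perm
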